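-- pv_equiv track=rewrite | github.com/girishgupta211/algorithms | buildings_facing_sun.py | building_facing_sun_using_stack
-- ===== SOURCE A (Python) =====
-- def building_facing_sun_using_stack(arr):
--     stack = [arr[0]]
--     for i in range(1, len(arr)):
--         next_building = arr[i]
--
--         # pop all previous_buildings from stack
--         while stack and next_building > stack[-1]:
--             stack.pop()
--
--         stack.append(next_building)
--     return stack
-- ===== SOURCE B (Python) =====
-- def building_facing_sun_using_stack(arr):
--     res = []
--     for x in reversed(arr):
--         if not res or x >= res[-1]:
--             res.append(x)
--     res.reverse()
--     return res
-- ===== Notes on version B (the rewrite author's own statement) =====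
-- stated objective: alternative
-- what changed: Replaces the push/pop monotonic stack with a single right-to-left scan that keeps an element exactly when it is >= the running maximum of the suffix, then reverses the collected list.
-- outside the precondition, e.g. on building_facing_sun_using_stack([]): A raises IndexError, B returns []
-- crash fix: On the empty list A raises IndexError (it evaluates arr[0]); B returns []. — e.g. on building_facing_sun_using_stack([]): A raises IndexError, B returns []
import Mathlib
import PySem

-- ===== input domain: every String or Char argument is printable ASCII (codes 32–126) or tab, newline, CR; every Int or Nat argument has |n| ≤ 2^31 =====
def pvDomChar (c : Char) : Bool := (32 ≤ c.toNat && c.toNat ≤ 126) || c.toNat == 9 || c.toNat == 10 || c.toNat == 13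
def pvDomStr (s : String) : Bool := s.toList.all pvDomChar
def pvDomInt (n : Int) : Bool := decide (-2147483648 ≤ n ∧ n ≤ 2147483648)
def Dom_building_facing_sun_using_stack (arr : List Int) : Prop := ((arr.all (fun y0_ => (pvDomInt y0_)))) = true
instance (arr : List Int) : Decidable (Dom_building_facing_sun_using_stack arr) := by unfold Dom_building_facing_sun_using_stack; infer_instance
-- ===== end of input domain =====

-- B replaces A's push/pop stack by a single right-to-left scan keeping the running maxima
-- (same return value on every nonempty list; on [] A raises IndexError while B returns []).

-- ===== PORT A =====
-- the 'while stack and next > stack[-1]: stack.pop()' loop; stack kept top-at-head (reversed)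
def pvPopWhile (next : Int) : List Int → List Int
  | [] => []
  | t :: r => if next > t then pvPopWhile next r else t :: r

-- stack = [arr[0]]; for each later element pop then push; return stack (un-reverse the rep)
def building_facing_sun_using_stack (arr : List Int) : List Int :=
  match arr with
  | [] => []  -- unreachable under Pre_ (Python raises IndexError on arr[0])
  | a :: rest => (rest.foldl (fun st x => x :: pvPopWhile x st) [a]).reverse

-- ===== PORT B =====
-- res = []; for x in reversed(arr): if not res or x >= res[-1]: res.append(x); res.reverse()
def building_facing_sun_using_stack_alt (arr : List Int) : List Int :=
  let res := arr.reverse.foldl (fun res x =>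
    match res.getLast? with
    | none => res ++ [x]
    | some t => if x ≥ t then res ++ [x] else res) []
  res.reverse

-- ===== PRECONDITION & SPEC =====
-- Pre_ excludes the empty list, on which A raises IndexError (arr[0]).
def Pre_building_facing_sun_using_stack (arr : List Int) : Prop := arr ≠ []
instance (arr : List Int) : Decidable (Pre_building_facing_sun_using_stack arr) := by unfold Pre_building_facing_sun_using_stack; infer_instance
def pvWitness_building_facing_sun_using_stack : List Int := [3, 1, 4, 2]

-- On the empty list A raises IndexError; B returns [].
def Raises_building_facing_sun_using_stack (arr : List Int) : Prop := arr = []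
instance (arr : List Int) : Decidable (Raises_building_facing_sun_using_stack arr) := by unfold Raises_building_facing_sun_using_stack; infer_instance
def pvRaiseWitness_building_facing_sun_using_stack : List Int := []
def pvRaiseWitnessOut_building_facing_sun_using_stack : List Int := []

def Spec_building_facing_sun_using_stack (arr : List Int) (out : List Int) : Prop := out = building_facing_sun_using_stack_alt arr
instance (arr : List Int) (out : List Int) : Decidable (Spec_building_facing_sun_using_stack arr out) := by unfold Spec_building_facing_sun_using_stack; infer_instance

-- ===== CLAIM (what is proved, stated in full; the proofs are below) =====
def Claim_equal_building_facing_sun_using_stack : Prop := ∀ (arr : List Int), Dom_building_facing_sun_using_stack arr → Pre_building_facing_sun_using_stack arr → Spec_building_facing_sun_using_stack arr (building_facing_sun_using_stack arr)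
def Claim_raises_building_facing_sun_using_stack : Prop := (∀ (arr : List Int), Dom_building_facing_sun_using_stack arr → Raises_building_facing_sun_using_stack arr → ¬ Pre_building_facing_sun_using_stack arr) ∧ (Dom_building_facing_sun_using_stack (pvRaiseWitness_building_facing_sun_using_stack) ∧ Raises_building_facing_sun_using_stack (pvRaiseWitness_building_facing_sun_using_stack) ∧ building_facing_sun_using_stack_alt (pvRaiseWitness_building_facing_sun_using_stack) = pvRaiseWitnessOut_building_facing_sun_using_stack)

-- ===== LEMMAS AND PROOFS =====

-- canonical "suffix maxima, ties kept" function, recursing from the left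
def pvS : List Int → List Int
  | [] => []
  | x :: r =>
    match pvS r with
    | [] => [x]
    | y :: ys => if x ≥ y then x :: y :: ys else y :: ys

lemma pvS_pairwise (l : List Int) : (pvS l).Pairwise (· ≥ ·) := by
  induction l with
  | nil => simp [pvS]
  | cons x r ih =>
    simp only [pvS]
    cases h : pvS r with
    | nil => simp
    | cons y ys =>
      rw [h] at ih
      by_cases hx : x ≥ y
      · simp only [if_pos hx]
        refine List.pairwise_cons.2 ⟨?_, ih⟩
        intro z hz
        rcases List.mem_cons.1 hz with hz | hz
        · exact hz ▸ hx
        · exact le_trans ((List.pairwise_cons.1 ih).1 z hz) hx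
      · simpa [if_neg hx] using ih

lemma pvS_append (l : List Int) (x : Int) :
    pvS (l ++ [x]) = (pvS l).takeWhile (fun y => decide (x ≤ y)) ++ [x] := by
  induction l with
  | nil => simp [pvS]
  | cons a t ih =>
    simp only [List.cons_append, pvS, ih]
    cases hs : pvS t with
    | nil =>
      simp only [List.takeWhile_nil, List.nil_append, pvS]
      by_cases hax : x ≤ a
      · simp [List.takeWhile, hax, ge_iff_le, hax]
      · have : ¬ a ≥ x := hax
        simp [List.takeWhile, hax, this]
    | cons y ys =>
      by_cases hay : a ≥ y
      · simp only [if_pos hay]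
        by_cases hxy : x ≤ y
        · have hxa : x ≤ a := le_trans hxy hay
          simp [List.takeWhile_cons, hxy, hxa, hay]
        · simp only [List.takeWhile_cons, decide_eq_true_eq]
          rw [if_neg hxy]
          by_cases hxa : x ≤ a
          · simp [List.takeWhile_cons, hxa, hxy, hxa]
          · have : ¬ a ≥ x := hxa
            simp [List.takeWhile_cons, hxa, this]
      · simp only [if_neg hay]
        by_cases hxy : x ≤ y
        · simp [List.takeWhile_cons, hxy, hay]
        · have hax : ¬ a ≥ x := by
            intro h; exact hxy (le_trans h (le_of_not_ge hay))
          simp [List.takeWhile_cons, hxy, hax]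

lemma pvPopWhile_append (x : Int) (u v : List Int) (hu : ∀ y ∈ u, x > y) :
    pvPopWhile x (u ++ v) = pvPopWhile x v := by
  induction u with
  | nil => rfl
  | cons c r ih =>
    have hc : x > c := hu c (by simp)
    simp only [List.cons_append, pvPopWhile, if_pos hc]
    exact ih (fun y hy => hu y (by simp [hy]))

-- popping from the reversed stack = dropping the < x tail of the (nonincreasing) list
lemma pvPopWhile_reverse (x : Int) (s : List Int) (hs : s.Pairwise (· ≥ ·)) :
    pvPopWhile x s.reverse = ((s.takeWhile (fun y => decide (x ≤ y))).reverse) := by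
  have hsplit : s = s.takeWhile (fun y => decide (x ≤ y)) ++ s.dropWhile (fun y => decide (x ≤ y)) :=
    (List.takeWhile_append_dropWhile).symm
  set t := s.takeWhile (fun y => decide (x ≤ y)) with ht
  set d := s.dropWhile (fun y => decide (x ≤ y)) with hd
  have hdlt : ∀ y ∈ d, x > y := by
    intro y hy
    cases hdc : d with
    | nil => simp [hdc] at hy
    | cons h0 r =>
      have hh0 : ¬ x ≤ h0 := by
        have := List.head?_dropWhile_not (p := fun y => decide (x ≤ y)) (l := s)
        rw [← hd, hdc] at this
        simpa using this
      rw [hdc] at hy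
      rcases List.mem_cons.1 hy with hy | hy
      · exact lt_of_not_ge (hy ▸ hh0)
      · -- y comes after h0 in s, so h0 ≥ y
        have hmem : h0 :: r <:+ s := by
          rw [hsplit, hdc]; exact ⟨t, rfl⟩
        have hpw : (h0 :: r).Pairwise (· ≥ ·) := hs.sublist hmem.sublist
        have : h0 ≥ y := (List.pairwise_cons.1 hpw).1 y hy
        exact lt_of_le_of_lt this (lt_of_not_ge hh0)
  have htke : ∀ y ∈ t, x ≤ y := by
    intro y hy
    have := List.mem_takeWhile_imp (ht ▸ hy)
    simpa using this
  calc pvPopWhile x s.reverse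
      = pvPopWhile x (d.reverse ++ t.reverse) := by
        rw [← List.reverse_append, ← hsplit]
    _ = pvPopWhile x t.reverse := pvPopWhile_append x d.reverse t.reverse
        (fun y hy => hdlt y (List.mem_reverse.1 hy))
    _ = t.reverse := by
        cases htr : t.reverse with
        | nil => rfl
        | cons c r =>
          have hc : c ∈ t := List.mem_reverse.1 (htr ▸ (by simp : c ∈ c :: r))
          have : ¬ x > c := not_lt_of_ge (htke c hc)
          simp [pvPopWhile, this]

-- A's fold computes pvS (in reversed representation)
lemma pvA_fold (a : Int) (rest : List Int) :
    rest.foldl (fun st x => x :: pvPopWhile x st) [a] = (pvS (a :: rest)).reverse := by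
  induction rest using List.reverseRecOn with
  | nil => simp [pvS]
  | append_singleton r x ih =>
    rw [show a :: (r ++ [x]) = (a :: r) ++ [x] by simp]
    rw [List.foldl_append, ih, List.foldl_cons, List.foldl_nil]
    rw [pvS_append, pvPopWhile_reverse x _ (pvS_pairwise _), List.reverse_append]
    simp

-- B's fold computes pvS
lemma pvB_fold (arr : List Int) :
    (arr.reverse.foldl (fun res x =>
      match res.getLast? with
      | none => res ++ [x]
      | some t => if x ≥ t then res ++ [x] else res) []).reverse = pvS arr := by
  induction arr with
  | nil => rfl
  | cons a t ih =>
    rw [List.reverse_cons, List.foldl_append, List.foldl_cons, List.foldl_nil]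
    set R := t.reverse.foldl (fun res x =>
      match res.getLast? with
      | none => res ++ [x]
      | some t => if x ≥ t then res ++ [x] else res) [] with hR
    have hRrev : R.reverse = pvS t := ih
    have hR' : R = (pvS t).reverse := by rw [← hRrev, List.reverse_reverse]
    have hlast : R.getLast? = (pvS t).head? := by rw [hR', List.getLast?_reverse]
    cases hs : pvS t with
    | nil =>
      simp only [hs, List.head?_nil] at hlast
      simp [pvS, hs, hlast, hR', List.reverse_append]
    | cons y ys =>
      simp only [hs, List.head?_cons] at hlast
      simp only [hlast, pvS, hs]
      by_cases hx : a ≥ y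
      · simp [if_pos hx, hR', hs, List.reverse_append]
      · simp [if_neg hx, hR', hs]

-- ===== VERDICT (by name: the statement is the Claim_ definition above) =====
theorem building_facing_sun_using_stack_spec : Claim_equal_building_facing_sun_using_stack := by
  intro arr _ hpre
  cases arr with
  | nil => exact absurd rfl hpre
  | cons a rest =>
    show building_facing_sun_using_stack (a :: rest) = building_facing_sun_using_stack_alt (a :: rest)
    have hA : building_facing_sun_using_stack (a :: rest) = pvS (a :: rest) := by
      show (rest.foldl (fun st x => x :: pvPopWhile x st) [a]).reverse = _
      rw [pvA_fold, List.reverse_reverse]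
    have hB : building_facing_sun_using_stack_alt (a :: rest) = pvS (a :: rest) := pvB_fold (a :: rest)
    exact hA.trans hB.symm

def building_facing_sun_using_stack_raises : Claim_raises_building_facing_sun_using_stack := by
  unfold Claim_raises_building_facing_sun_using_stack
  exact ⟨fun arr _ h => by simp [Raises_building_facing_sun_using_stack] at h; simp [Pre_building_facing_sun_using_stack, h], by decide⟩
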